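-- pv_equiv track=rewrite | github.com/ajeebtech/autocorrect | low level model.py | edits1_qwerty
-- ===== SOURCE A (Python) =====
-- QWERTY_ADJACENT_KEYS = {
--     'a': 'qwsz', 'b': 'vghn', 'c': 'xdfv', 'd': 'ersfcx',
--     'e': 'wsdr', 'f': 'rtgdvc', 'g': 'tyfhvb', 'h': 'yugjnb',
--     'i': 'ujko', 'j': 'uikhmn', 'k': 'ijolm', 'l': 'kop',
--     'm': 'njk', 'n': 'bhjm', 'o': 'iklp', 'p': 'ol',
--     'q': 'wa', 'r': 'edft', 's': 'awedxz', 't': 'rfgy',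
--     'u': 'yhji', 'v': 'cfgb', 'w': 'qase', 'x': 'zsdc',
--     'y': 'tghu', 'z': 'asx'
-- }
--
-- def edits1_qwerty(word):
--     letters = 'abcdefghijklmnopqrstuvwxyz'
--     splits = [(word[:i], word[i:]) for i in range(len(word) + 1)]
--
--     deletes = [L + R[1:] for L, R in splits if R]
--     transposes = [L + R[1] + R[0] + R[2:] for L, R in splits if len(R) > 1]
--     replaces = [L + c + R[1:] for L, R in splits if R for c in QWERTY_ADJACENT_KEYS.get(R[0], '')]
--     inserts = [L + c + R for L, R in splits if R for c in QWERTY_ADJACENT_KEYS.get(R[0], '')]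
--
--     return set(deletes + transposes + replaces + inserts)
-- ===== SOURCE B (Python) =====
-- QWERTY_ADJACENT_KEYS = {
--     'a': 'qwsz', 'b': 'vghn', 'c': 'xdfv', 'd': 'ersfcx',
--     'e': 'wsdr', 'f': 'rtgdvc', 'g': 'tyfhvb', 'h': 'yugjnb',
--     'i': 'ujko', 'j': 'uikhmn', 'k': 'ijolm', 'l': 'kop',
--     'm': 'njk', 'n': 'bhjm', 'o': 'iklp', 'p': 'ol',
--     'q': 'wa', 'r': 'edft', 's': 'awedxz', 't': 'rfgy',
--     'u': 'yhji', 'v': 'cfgb', 'w': 'qase', 'x': 'zsdc',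
--     'y': 'tghu', 'z': 'asx'
-- }
--
-- def _edit_families(s):
--     # structural recursion on the word: the four edit families of s are the
--     # edits touching its first character plus the head character prepended to
--     # every edit of the tail -- no split positions, no slicing by index
--     if not s:
--         return [], [], [], []
--     c, rest = s[0], s[1:]
--     d, t, r, i = _edit_families(rest)
--     adj = QWERTY_ADJACENT_KEYS.get(c, '')
--     return ([rest] + [c + x for x in d],
--             ([rest[0] + c + rest[1:]] if rest else []) + [c + x for x in t],
--             [a + rest for a in adj] + [c + x for x in r],
--             [a + s for a in adj] + [c + x for x in i])
--
-- def edits1_qwerty(word):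
--     d, t, r, i = _edit_families(word)
--     return set(d + t + r + i)
-- ===== Notes on version B (the rewrite author's own statement) =====
-- stated objective: alternative
-- what changed: Replaces the splits list and the four index/slice comprehensions by a structural recursion on the word: the edit families of a word are the edits touching its head character together with the head prepended to every edit of the tail (no split positions, no slicing).
import Mathlib
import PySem

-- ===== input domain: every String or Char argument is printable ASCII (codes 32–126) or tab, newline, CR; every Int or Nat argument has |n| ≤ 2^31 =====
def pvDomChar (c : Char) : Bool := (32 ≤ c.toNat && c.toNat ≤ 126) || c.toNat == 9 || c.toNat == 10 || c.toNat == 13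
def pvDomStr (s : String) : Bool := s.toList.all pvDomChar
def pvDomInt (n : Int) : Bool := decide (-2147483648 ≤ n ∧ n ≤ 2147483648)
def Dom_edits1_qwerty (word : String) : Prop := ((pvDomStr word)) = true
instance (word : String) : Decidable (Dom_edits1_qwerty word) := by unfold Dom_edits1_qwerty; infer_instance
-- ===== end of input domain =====

-- B replaces A's splits list and the four index/slice comprehensions by one structural
-- recursion on the word (edits touching the head character, plus the head prepended to the
-- tail's edits); return value proved equal.

-- shared module constant QWERTY_ADJACENT_KEYS and the lookup .get(x, '') both versions perform
def qwertyAdjacentKeys : PySem.Dict String String := PySem.Dict.ofList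
  [("a", "qwsz"), ("b", "vghn"), ("c", "xdfv"), ("d", "ersfcx"),
   ("e", "wsdr"), ("f", "rtgdvc"), ("g", "tyfhvb"), ("h", "yugjnb"),
   ("i", "ujko"), ("j", "uikhmn"), ("k", "ijolm"), ("l", "kop"),
   ("m", "njk"), ("n", "bhjm"), ("o", "iklp"), ("p", "ol"),
   ("q", "wa"), ("r", "edft"), ("s", "awedxz"), ("t", "rfgy"),
   ("u", "yhji"), ("v", "cfgb"), ("w", "qase"), ("x", "zsdc"),
   ("y", "tghu"), ("z", "asx")]

def adjOf (c : Char) : List Char := (qwertyAdjacentKeys.getD (String.ofList [c]) "").toList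

-- ===== PORT A =====
-- splits = [(word[:i], word[i:]) for i in range(len(word) + 1)]
def pySplits (cs : List Char) : List (List Char × List Char) :=
  (PySem.List.pyRange 0 ((cs.length : Int) + 1) 1).map
    (fun i => (PySem.List.slice cs none (some i), PySem.List.slice cs (some i) none))

-- deletes = [L + R[1:] for L, R in splits if R]
def pyDeletes (cs : List Char) : List (List Char) :=
  (pySplits cs).flatMap
    (fun p => if p.2 = [] then [] else [p.1 ++ PySem.List.slice p.2 (some 1) none])

-- transposes = [L + R[1] + R[0] + R[2:] for L, R in splits if len(R) > 1]
def pyTransposes (cs : List Char) : List (List Char) :=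
  (pySplits cs).flatMap
    (fun p => if 1 < p.2.length then
      [p.1 ++ [PySem.List.pyGetD p.2 1 ' '] ++ [PySem.List.pyGetD p.2 0 ' ']
        ++ PySem.List.slice p.2 (some 2) none] else [])

-- replaces = [L + c + R[1:] for L, R in splits if R for c in QWERTY_ADJACENT_KEYS.get(R[0], '')]
def pyReplaces (cs : List Char) : List (List Char) :=
  (pySplits cs).flatMap
    (fun p => if p.2 = [] then [] else
      (adjOf (PySem.List.pyGetD p.2 0 ' ')).map
        (fun c => p.1 ++ [c] ++ PySem.List.slice p.2 (some 1) none))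

-- inserts = [L + c + R for L, R in splits if R for c in QWERTY_ADJACENT_KEYS.get(R[0], '')]
def pyInserts (cs : List Char) : List (List Char) :=
  (pySplits cs).flatMap
    (fun p => if p.2 = [] then [] else
      (adjOf (PySem.List.pyGetD p.2 0 ' ')).map (fun c => p.1 ++ [c] ++ p.2))

def edits1_qwerty (word : String) : List String :=
  let cs := word.toList
  PySem.Set.ofList
    ((pyDeletes cs ++ pyTransposes cs ++ pyReplaces cs ++ pyInserts cs).map
      (fun l => String.ofList l))

-- ===== PORT B =====
-- _edit_families(s): structural recursion on the word, returning the 4-tuple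
-- (deletes, transposes, replaces, inserts); 'c + x' is cons, no slicing by position
def editFamilies : List Char →
    List (List Char) × List (List Char) × List (List Char) × List (List Char)
  | [] => ([], [], [], [])
  | c :: rest =>
    let p := editFamilies rest
    (rest :: p.1.map (fun x => c :: x),
     (match rest with | [] => [] | r0 :: rt => [r0 :: c :: rt]) ++ p.2.1.map (fun x => c :: x),
     (adjOf c).map (fun a => a :: rest) ++ p.2.2.1.map (fun x => c :: x),
     (adjOf c).map (fun a => a :: c :: rest) ++ p.2.2.2.map (fun x => c :: x))

def edits1_qwerty_alt (word : String) : List String :=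
  let p := editFamilies word.toList
  PySem.Set.ofList
    ((p.1 ++ p.2.1 ++ p.2.2.1 ++ p.2.2.2).map (fun l => String.ofList l))

-- ===== PRECONDITION & SPEC =====
def Spec_edits1_qwerty (word : String) (out : List String) : Prop := out = edits1_qwerty_alt word
instance (word : String) (out : List String) : Decidable (Spec_edits1_qwerty word out) := by unfold Spec_edits1_qwerty; infer_instance

-- ===== CLAIM (what is proved, stated in full; the proofs are below) =====
def Claim_equal_edits1_qwerty : Prop := ∀ (word : String), Dom_edits1_qwerty word → Spec_edits1_qwerty word (edits1_qwerty word)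

-- ===== LEMMAS AND PROOFS =====

-- proof-side views: the four families of editFamilies as separate recursions
def dB : List Char → List (List Char)
  | [] => []
  | c :: cs => cs :: (dB cs).map (fun x => c :: x)

def tB : List Char → List (List Char)
  | [] => []
  | c :: cs =>
    (match cs with
     | [] => []
     | r0 :: rt => [r0 :: c :: rt]) ++ (tB cs).map (fun x => c :: x)

def rB : List Char → List (List Char)
  | [] => []
  | c :: cs => (adjOf c).map (fun a => a :: cs) ++ (rB cs).map (fun x => c :: x)

def iB : List Char → List (List Char)
  | [] => []
  | c :: cs => (adjOf c).map (fun a => a :: c :: cs) ++ (iB cs).map (fun x => c :: x)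

lemma editFamilies_eq (cs : List Char) :
    editFamilies cs = (dB cs, tB cs, rB cs, iB cs) := by
  induction cs with
  | nil => rfl
  | cons c cs ih => rw [editFamilies.eq_def]; simp [ih, dB, tB, rB, iB]

lemma pySplits_eq (cs : List Char) :
    pySplits cs = (List.range (cs.length + 1)).map (fun k => (cs.take k, cs.drop k)) := by
  have h : PySem.List.pyRange 0 ((cs.length : Int) + 1) 1
      = (List.range (cs.length + 1)).map (fun k => ((k : Nat) : Int)) := by
    rw [PySem.List.pyRange_one]
    simp
  rw [pySplits, h, List.map_map]
  refine List.map_congr_left (fun k _ => ?_)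
  simp [PySem.List.slice_to_natCast, PySem.List.slice_from_natCast]

lemma pySplits_nil : pySplits [] = [([], [])] := by
  simp [pySplits_eq]

lemma pySplits_cons (c : Char) (cs : List Char) :
    pySplits (c :: cs) = ([], c :: cs) :: (pySplits cs).map (fun p => (c :: p.1, p.2)) := by
  rw [pySplits_eq, pySplits_eq]
  simp only [List.length_cons]
  rw [List.range_succ_eq_map]
  simp [List.map_map, Function.comp_def]

lemma deletes_eq (cs : List Char) : pyDeletes cs = dB cs := by
  induction cs with
  | nil => simp [pyDeletes, pySplits_nil, dB]
  | cons c cs ih =>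
    rw [pyDeletes, pySplits_cons, List.flatMap_cons, List.flatMap_map]
    have h : (fun p : List Char × List Char =>
        if (c :: p.1, p.2).2 = [] then ([] : List (List Char))
        else [(c :: p.1, p.2).1 ++ PySem.List.slice (c :: p.1, p.2).2 (some 1) none])
        = fun p => ((if p.2 = [] then ([] : List (List Char))
            else [p.1 ++ PySem.List.slice p.2 (some 1) none]).map (fun x => c :: x)) := by
      funext p
      by_cases h : p.2 = [] <;> simp [h]
    rw [h, ← List.map_flatMap, ← pyDeletes, ih, dB]
    simp [PySem.List.slice_from_one]

lemma transposes_eq (cs : List Char) : pyTransposes cs = tB cs := by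
  induction cs with
  | nil => simp [pyTransposes, pySplits_nil, tB]
  | cons c cs ih =>
    rw [pyTransposes, pySplits_cons, List.flatMap_cons, List.flatMap_map]
    have h : (fun p : List Char × List Char =>
        if 1 < (c :: p.1, p.2).2.length then
          [(c :: p.1, p.2).1 ++ [PySem.List.pyGetD (c :: p.1, p.2).2 1 ' ']
            ++ [PySem.List.pyGetD (c :: p.1, p.2).2 0 ' ']
            ++ PySem.List.slice (c :: p.1, p.2).2 (some 2) none] else ([] : List (List Char)))
        = fun p => ((if 1 < p.2.length then
            [p.1 ++ [PySem.List.pyGetD p.2 1 ' '] ++ [PySem.List.pyGetD p.2 0 ' ']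
              ++ PySem.List.slice p.2 (some 2) none] else ([] : List (List Char))).map
            (fun x => c :: x)) := by
      funext p
      by_cases h : 1 < p.2.length <;> simp [h]
    rw [h, ← List.map_flatMap, ← pyTransposes, ih]
    cases cs with
    | nil => simp [tB]
    | cons r0 rt =>
      have h2 : PySem.List.slice (c :: r0 :: rt) (some 2) none = rt := by
        simp [pysem]
      have hg1 : PySem.List.pyGetD (c :: r0 :: rt) 1 ' ' = r0 := by simp [pysem]
      have hg0 : PySem.List.pyGetD (c :: r0 :: rt) 0 ' ' = c := by simp [pysem]
      simp [tB, h2, hg1, hg0]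

lemma replaces_eq (cs : List Char) : pyReplaces cs = rB cs := by
  induction cs with
  | nil => simp [pyReplaces, pySplits_nil, rB]
  | cons c cs ih =>
    rw [pyReplaces, pySplits_cons, List.flatMap_cons, List.flatMap_map]
    have h : (fun p : List Char × List Char =>
        if (c :: p.1, p.2).2 = [] then ([] : List (List Char)) else
          (adjOf (PySem.List.pyGetD (c :: p.1, p.2).2 0 ' ')).map
            (fun d => (c :: p.1, p.2).1 ++ [d] ++ PySem.List.slice (c :: p.1, p.2).2 (some 1) none))
        = fun p => ((if p.2 = [] then ([] : List (List Char)) else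
            (adjOf (PySem.List.pyGetD p.2 0 ' ')).map
              (fun d => p.1 ++ [d] ++ PySem.List.slice p.2 (some 1) none)).map
            (fun x => c :: x)) := by
      funext p
      by_cases h : p.2 = [] <;> simp [h, List.map_map, Function.comp_def]
    rw [h, ← List.map_flatMap, ← pyReplaces, ih, rB]
    simp [PySem.List.slice_from_one, PySem.List.pyGetD_zero_cons]

lemma inserts_eq (cs : List Char) : pyInserts cs = iB cs := by
  induction cs with
  | nil => simp [pyInserts, pySplits_nil, iB]
  | cons c cs ih =>
    rw [pyInserts, pySplits_cons, List.flatMap_cons, List.flatMap_map]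
    have h : (fun p : List Char × List Char =>
        if (c :: p.1, p.2).2 = [] then ([] : List (List Char)) else
          (adjOf (PySem.List.pyGetD (c :: p.1, p.2).2 0 ' ')).map
            (fun d => (c :: p.1, p.2).1 ++ [d] ++ (c :: p.1, p.2).2))
        = fun p => ((if p.2 = [] then ([] : List (List Char)) else
            (adjOf (PySem.List.pyGetD p.2 0 ' ')).map (fun d => p.1 ++ [d] ++ p.2)).map
            (fun x => c :: x)) := by
      funext p
      by_cases h : p.2 = [] <;> simp [h, List.map_map, Function.comp_def]
    rw [h, ← List.map_flatMap, ← pyInserts, ih, iB]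
    simp [PySem.List.pyGetD_zero_cons]

-- ===== VERDICT (by name: the statement is the Claim_ definition above) =====
theorem edits1_qwerty_spec : Claim_equal_edits1_qwerty := by
  intro word _
  unfold Spec_edits1_qwerty
  simp only [edits1_qwerty, edits1_qwerty_alt, deletes_eq, transposes_eq, replaces_eq, inserts_eq, editFamilies_eq]
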